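-- pv_equiv track=rewrite | github.com/jsinghw/backend-nested-brackets | nested.py | valid_curly_brace
-- ===== SOURCE A (Python) =====
-- def valid_curly_brace(string):
--     cnt = 0
--     pos = 0
--     for char in string:
--         if char == '{':
--             cnt += 1
--         if char == '}':
--             cnt -= 1
--         if cnt < 0:
--             return('NO ' + str(pos))
--         pos += 1
--     if cnt == 0:
--         return('YES')
--     else:
--         return('NO ' + str(pos))
-- ===== SOURCE B (Python) =====
-- def valid_curly_brace(string):
--     # Table-then-search: build the running-balance prefix table, then find the first negative entry.
--     prefix = []
--     total = 0
--     for char in string: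
--         total += (char == '{') - (char == '}')
--         prefix.append(total)
--     for i, v in enumerate(prefix):
--         if v < 0:
--             return 'NO ' + str(i)
--     return 'YES' if total == 0 else 'NO ' + str(len(string))
-- ===== Notes on version B (the rewrite author's own statement) =====
-- stated objective: alternative
-- what changed: B first materialises the running-balance prefix table in one pass, then does a separate search pass for the first negative entry and checks the final balance, instead of A's single early-exit loop with two counters.
import Mathlib
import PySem

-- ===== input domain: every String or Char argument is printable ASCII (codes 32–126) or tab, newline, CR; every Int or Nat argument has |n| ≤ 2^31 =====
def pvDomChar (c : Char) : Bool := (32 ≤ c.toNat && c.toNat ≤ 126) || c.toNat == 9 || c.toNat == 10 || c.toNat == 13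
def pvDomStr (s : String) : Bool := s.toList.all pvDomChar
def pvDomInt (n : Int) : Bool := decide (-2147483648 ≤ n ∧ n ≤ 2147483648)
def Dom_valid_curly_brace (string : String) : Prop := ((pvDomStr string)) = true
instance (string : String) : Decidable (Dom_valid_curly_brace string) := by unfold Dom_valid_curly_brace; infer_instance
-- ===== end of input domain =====

-- B builds the running-balance prefix table first and then searches it for the first
-- negative entry, instead of A's single early-exit loop; same cost, different decomposition.


-- ===== PORT A =====
-- A's for-loop over the characters, carrying (cnt, pos), with the early 'NO pos' return.
def pvALoop : List Char → Int → Int → String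
  | [], cnt, pos => if cnt = 0 then "YES" else "NO " ++ PySem.Int.toStr pos
  | c :: rest, cnt, pos =>
    let cnt1 := if c = '{' then cnt + 1 else cnt
    let cnt2 := if c = '}' then cnt1 - 1 else cnt1
    if cnt2 < 0 then "NO " ++ PySem.Int.toStr pos
    else pvALoop rest cnt2 (pos + 1)

def valid_curly_brace (string : String) : String := pvALoop string.toList 0 0

-- ===== PORT B =====
-- first pass of Source B: build (prefix, total) by appending the running balance
def pvBBuild (l : List Char) : List Int × Int :=
  l.foldl
    (fun p c =>
      (p.1 ++ [p.2 + ((if c = '{' then (1 : Int) else 0) - (if c = '}' then 1 else 0))],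
       p.2 + ((if c = '{' then (1 : Int) else 0) - (if c = '}' then 1 else 0))))
    ([], 0)

-- second pass of Source B: enumerate(prefix), return the first index with a negative value
def pvBSearch : List Int → Int → Option Int
  | [], _ => none
  | v :: rest, i => if v < 0 then some i else pvBSearch rest (i + 1)

def valid_curly_brace_alt (string : String) : String :=
  let p := pvBBuild string.toList
  match pvBSearch p.1 0 with
  | some i => "NO " ++ PySem.Int.toStr i
  | none => if p.2 = 0 then "YES" else "NO " ++ PySem.Int.toStr (string.toList.length : Int)

-- ===== PRECONDITION & SPEC =====
def Spec_valid_curly_brace (string : String) (out : String) : Prop := out = valid_curly_brace_alt string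
instance (string : String) (out : String) : Decidable (Spec_valid_curly_brace string out) := by unfold Spec_valid_curly_brace; infer_instance

-- ===== CLAIM (what is proved, stated in full; the proofs are below) =====
def Claim_equal_valid_curly_brace : Prop := ∀ (string : String), Dom_valid_curly_brace string → Spec_valid_curly_brace string (valid_curly_brace string)

-- ===== LEMMAS AND PROOFS =====

def pvDelta (c : Char) : Int := (if c = '{' then 1 else 0) - (if c = '}' then 1 else 0)

def pvPref : List Char → Int → List Int
  | [], _ => []
  | c :: rest, t => (t + pvDelta c) :: pvPref rest (t + pvDelta c)

def pvSum (l : List Char) : Int := (l.map pvDelta).sum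

theorem pvBBuild_inv (l : List Char) :
    ∀ (acc : List Int) (t : Int),
      l.foldl
        (fun p c =>
          (p.1 ++ [p.2 + ((if c = '{' then (1 : Int) else 0) - (if c = '}' then 1 else 0))],
           p.2 + ((if c = '{' then (1 : Int) else 0) - (if c = '}' then 1 else 0))))
        (acc, t)
      = (acc ++ pvPref l t, t + pvSum l) := by
  induction l with
  | nil => intro acc t; simp [pvPref, pvSum]
  | cons c rest ih =>
      intro acc t
      simp only [List.foldl_cons, ih, pvPref, pvSum, List.map_cons, List.sum_cons, pvDelta,
        List.append_assoc, List.singleton_append]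
      rw [add_assoc]

theorem pvMain (l : List Char) : ∀ (cnt pos : Int),
    pvALoop l cnt pos =
      (match pvBSearch (pvPref l cnt) pos with
       | some i => "NO " ++ PySem.Int.toStr i
       | none => if cnt + pvSum l = 0 then "YES" else "NO " ++ PySem.Int.toStr (pos + l.length)) := by
  induction l with
  | nil =>
      intro cnt pos
      simp [pvALoop, pvPref, pvSum, pvBSearch]
  | cons c rest ih =>
      intro cnt pos
      have hstep : (if c = '}' then (if c = '{' then cnt + 1 else cnt) - 1
                    else (if c = '{' then cnt + 1 else cnt)) = cnt + pvDelta c := by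
        unfold pvDelta
        by_cases h1 : c = '{' <;> by_cases h2 : c = '}' <;> simp [h1, h2] <;> omega
      simp only [pvALoop, hstep, pvPref, pvBSearch]
      by_cases hneg : cnt + pvDelta c < 0
      · simp [hneg]
      · simp only [if_neg hneg, ih]
        have hsum : cnt + pvSum (c :: rest) = (cnt + pvDelta c) + pvSum rest := by
          simp [pvSum]; ring
        have hlen : pos + ((c :: rest).length : Int) = (pos + 1) + (rest.length : Int) := by
          simp; ring
        rw [hsum, hlen]

theorem pvAlt_eq (string : String) :
    valid_curly_brace_alt string =
      (match pvBSearch (pvPref string.toList 0) 0 with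
       | some i => "NO " ++ PySem.Int.toStr i
       | none => if pvSum string.toList = 0 then "YES"
                 else "NO " ++ PySem.Int.toStr ((string.toList.length : Int))) := by
  unfold valid_curly_brace_alt pvBBuild
  rw [pvBBuild_inv]
  simp

-- ===== VERDICT (by name: the statement is the Claim_ definition above) =====
theorem valid_curly_brace_spec : Claim_equal_valid_curly_brace := by
  intro s _
  unfold Spec_valid_curly_brace valid_curly_brace
  rw [pvMain, pvAlt_eq]
  simp
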